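-- pv_equiv track=rewrite | github.com/beyondelastic/agentic-form-filler | src/agents/form_filler.py | _categorize_extracted_data
-- ===== SOURCE A (Python) =====
-- from typing import Dict, Any, Optional
--
-- def _categorize_extracted_data(extracted_data: Dict[str, Any]) -> Dict[str, int]:
--     """Categorize extracted data fields for summary reporting."""
--     categories = {
--         "Patient Information": 0,
--         "Medical Data": 0,
--         "Lab Results": 0,
--         "Dates": 0,
--         "Administrative": 0,
--         "Other": 0
--     }
--
--     for field_name in extracted_data.keys():
--         field_lower = field_name.lower()
--
--         # Patient information
--         if any(term in field_lower for term in ["patient", "name", "id", "nummer"]):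
--             categories["Patient Information"] += 1
--         # Medical data
--         elif any(term in field_lower for term in ["diagnosis", "treatment", "medication", "pathology", "tumor", "cancer", "stage", "tnm"]):
--             categories["Medical Data"] += 1
--         # Lab results
--         elif any(term in field_lower for term in ["lab", "test", "result", "value", "parameter", "hb", "leuko", "creatinine"]):
--             categories["Lab Results"] += 1
--         # Dates
--         elif any(term in field_lower for term in ["date", "datum", "time"]):
--             categories["Dates"] += 1
--         # Administrative
--         elif any(term in field_lower for term in ["hospital", "clinic", "department", "case", "fall", "report"]):
--             categories["Administrative"] += 1
--         else:
--             categories["Other"] += 1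
--
--     # Remove empty categories
--     return {k: v for k, v in categories.items() if v > 0}
-- ===== SOURCE B (Python) =====
-- from typing import Dict, Any
--
-- _TABLE = [
--     ("Patient Information", ("patient", "name", "id", "nummer")),
--     ("Medical Data", ("diagnosis", "treatment", "medication", "pathology", "tumor", "cancer", "stage", "tnm")),
--     ("Lab Results", ("lab", "test", "result", "value", "parameter", "hb", "leuko", "creatinine")),
--     ("Dates", ("date", "datum", "time")),
--     ("Administrative", ("hospital", "clinic", "department", "case", "fall", "report")),
-- ]
--
-- def _categorize_extracted_data(extracted_data: Dict[str, Any]) -> Dict[str, int]: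
--     """Categorize extracted data fields for summary reporting.
--
--     Category-major: for each category in priority order, peel off the matching
--     fields from the remaining pool in one pass; what is left at the end is "Other".
--     """
--     remaining = [name.lower() for name in extracted_data.keys()]
--     pairs = []
--     for category, terms in _TABLE:
--         matched = [f for f in remaining if any(t in f for t in terms)]
--         if matched:
--             pairs.append((category, len(matched)))
--         remaining = [f for f in remaining if not any(t in f for t in terms)]
--     if remaining:
--         pairs.append(("Other", len(remaining)))
--     return dict(pairs)
-- ===== Notes on version B (the rewrite author's own statement) =====
-- stated objective: alternative
-- what changed: Replaced A's field-major single pass (a six-way if/elif ladder incrementing a pre-zeroed six-key dict, filtered afterwards) by a category-major computation: for each category in priority order one partition pass peels the matching fields off the remaining pool and records their count, the leftover pool counting as Other.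
import Mathlib
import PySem

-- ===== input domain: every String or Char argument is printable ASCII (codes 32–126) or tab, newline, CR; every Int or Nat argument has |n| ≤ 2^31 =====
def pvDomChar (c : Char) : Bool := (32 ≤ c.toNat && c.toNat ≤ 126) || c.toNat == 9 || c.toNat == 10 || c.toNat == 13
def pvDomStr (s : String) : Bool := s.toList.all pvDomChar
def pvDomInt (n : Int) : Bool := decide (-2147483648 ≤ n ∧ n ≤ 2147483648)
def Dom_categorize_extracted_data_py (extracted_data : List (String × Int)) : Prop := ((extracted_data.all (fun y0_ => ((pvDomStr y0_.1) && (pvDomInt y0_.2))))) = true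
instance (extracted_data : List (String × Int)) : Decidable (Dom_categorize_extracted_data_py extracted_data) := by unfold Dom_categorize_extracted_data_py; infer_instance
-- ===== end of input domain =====

-- B replaces A's field-major single pass (a six-way if/elif ladder updating a pre-zeroed dict,
-- filtered afterwards) by a category-major computation: one partition pass of the remaining
-- field pool per category, the leftovers counting as "Other" (alternative decomposition).

-- ===== PORT A =====
-- The dict argument arrives as an association list; `.keys()` is its deduplicated first-occurrence keys.
def categorize_extracted_data_py (extracted_data : List (String × Int)) : List (String × Int) :=
  let categories : PySem.Dict String Int :=
    PySem.Dict.ofList [("Patient Information", 0), ("Medical Data", 0), ("Lab Results", 0),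
                       ("Dates", 0), ("Administrative", 0), ("Other", 0)]
  let d := (PySem.List.dedup (extracted_data.map (·.1))).foldl (fun d field_name =>
    let field_lower := PySem.Str.lower field_name
    if ["patient", "name", "id", "nummer"].any (fun term => PySem.Str.isIn term field_lower) then
      d.modify "Patient Information" 0 (· + 1)
    else if ["diagnosis", "treatment", "medication", "pathology", "tumor", "cancer", "stage", "tnm"].any (fun term => PySem.Str.isIn term field_lower) then
      d.modify "Medical Data" 0 (· + 1)
    else if ["lab", "test", "result", "value", "parameter", "hb", "leuko", "creatinine"].any (fun term => PySem.Str.isIn term field_lower) then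
      d.modify "Lab Results" 0 (· + 1)
    else if ["date", "datum", "time"].any (fun term => PySem.Str.isIn term field_lower) then
      d.modify "Dates" 0 (· + 1)
    else if ["hospital", "clinic", "department", "case", "fall", "report"].any (fun term => PySem.Str.isIn term field_lower) then
      d.modify "Administrative" 0 (· + 1)
    else
      d.modify "Other" 0 (· + 1)) categories
  d.items.filter (fun kv => decide (kv.2 > 0))

-- ===== PORT B =====
def pvTable : List (String × List String) :=
  [("Patient Information", ["patient", "name", "id", "nummer"]),
   ("Medical Data", ["diagnosis", "treatment", "medication", "pathology", "tumor", "cancer", "stage", "tnm"]),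
   ("Lab Results", ["lab", "test", "result", "value", "parameter", "hb", "leuko", "creatinine"]),
   ("Dates", ["date", "datum", "time"]),
   ("Administrative", ["hospital", "clinic", "department", "case", "fall", "report"])]

-- the loop body of Source B: peel the fields matching this category off the pool, record the count if any
def pvStepB (st : List (String × Int) × List String) (entry : String × List String) :
    List (String × Int) × List String :=
  let matched := st.2.filter (fun f => entry.2.any (fun t => PySem.Str.isIn t f))
  (if matched.isEmpty then st.1 else st.1 ++ [(entry.1, (matched.length : Int))],
   st.2.filter (fun f => !(entry.2.any (fun t => PySem.Str.isIn t f))))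

def categorize_extracted_data_py_alt (extracted_data : List (String × Int)) : List (String × Int) :=
  let remaining := (PySem.List.dedup (extracted_data.map (·.1))).map PySem.Str.lower
  let res := pvTable.foldl pvStepB ([], remaining)
  let pairs := if res.2.isEmpty then res.1 else res.1 ++ [("Other", (res.2.length : Int))]
  (PySem.Dict.ofList pairs).items

-- ===== PRECONDITION & SPEC =====
def Spec_categorize_extracted_data_py (extracted_data : List (String × Int)) (out : List (String × Int)) : Prop := out = categorize_extracted_data_py_alt extracted_data
instance (extracted_data : List (String × Int)) (out : List (String × Int)) : Decidable (Spec_categorize_extracted_data_py extracted_data out) := by unfold Spec_categorize_extracted_data_py; infer_instance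

-- ===== CLAIM (what is proved, stated in full; the proofs are below) =====
def Claim_equal_categorize_extracted_data_py : Prop := ∀ (extracted_data : List (String × Int)), Dom_categorize_extracted_data_py extracted_data → Spec_categorize_extracted_data_py extracted_data (categorize_extracted_data_py extracted_data)

-- ===== LEMMAS AND PROOFS =====

def pvM (terms : List String) (f : String) : Bool := terms.any (fun t => PySem.Str.isIn t f)

def pvClassify (k : String) : String :=
  if pvM ["patient", "name", "id", "nummer"] (PySem.Str.lower k) then "Patient Information"
  else if pvM ["diagnosis", "treatment", "medication", "pathology", "tumor", "cancer", "stage", "tnm"] (PySem.Str.lower k) then "Medical Data"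
  else if pvM ["lab", "test", "result", "value", "parameter", "hb", "leuko", "creatinine"] (PySem.Str.lower k) then "Lab Results"
  else if pvM ["date", "datum", "time"] (PySem.Str.lower k) then "Dates"
  else if pvM ["hospital", "clinic", "department", "case", "fall", "report"] (PySem.Str.lower k) then "Administrative"
  else "Other"

def pvOrder : List String := pvTable.map (·.1) ++ ["Other"]

-- the value both programs compute: nonzero class counts in category order
def pvTarget (ks : List String) : List (String × Int) :=
  (pvOrder.map (fun c => (c, ((ks.map pvClassify).count c : Int)))).filter (fun kv => decide (kv.2 > 0))

theorem pv_step_eq (d : PySem.Dict String Int) (field_name : String) :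
    (let field_lower := PySem.Str.lower field_name
     if ["patient", "name", "id", "nummer"].any (fun term => PySem.Str.isIn term field_lower) then
       d.modify "Patient Information" 0 (· + 1)
     else if ["diagnosis", "treatment", "medication", "pathology", "tumor", "cancer", "stage", "tnm"].any (fun term => PySem.Str.isIn term field_lower) then
       d.modify "Medical Data" 0 (· + 1)
     else if ["lab", "test", "result", "value", "parameter", "hb", "leuko", "creatinine"].any (fun term => PySem.Str.isIn term field_lower) then
       d.modify "Lab Results" 0 (· + 1)
     else if ["date", "datum", "time"].any (fun term => PySem.Str.isIn term field_lower) then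
       d.modify "Dates" 0 (· + 1)
     else if ["hospital", "clinic", "department", "case", "fall", "report"].any (fun term => PySem.Str.isIn term field_lower) then
       d.modify "Administrative" 0 (· + 1)
     else
       d.modify "Other" 0 (· + 1))
    = d.modify (pvClassify field_name) 0 (· + 1) := by
  unfold pvClassify pvM
  cases h1 : ["patient", "name", "id", "nummer"].any (fun term => PySem.Str.isIn term (PySem.Str.lower field_name)) <;>
  cases h2 : ["diagnosis", "treatment", "medication", "pathology", "tumor", "cancer", "stage", "tnm"].any (fun term => PySem.Str.isIn term (PySem.Str.lower field_name)) <;>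
  cases h3 : ["lab", "test", "result", "value", "parameter", "hb", "leuko", "creatinine"].any (fun term => PySem.Str.isIn term (PySem.Str.lower field_name)) <;>
  cases h4 : ["date", "datum", "time"].any (fun term => PySem.Str.isIn term (PySem.Str.lower field_name)) <;>
  cases h5 : ["hospital", "clinic", "department", "case", "fall", "report"].any (fun term => PySem.Str.isIn term (PySem.Str.lower field_name)) <;>
  simp only [h1, h2, h3, h4, h5] <;> rfl

theorem pv_classify_mem (field_name : String) : pvClassify field_name ∈ pvOrder := by
  unfold pvClassify pvOrder pvTable
  split_ifs <;> simp

theorem pv_update_eq : ∀ (l : List String), (∀ c ∈ l, c ∈ pvOrder) →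
    PySem.Set.update pvOrder l = pvOrder
  | [], _ => rfl
  | c :: t, h => by
    have hc : PySem.Set.add pvOrder c = pvOrder := by
      have hm : c ∈ pvOrder := h c (List.mem_cons_self ..)
      simp [PySem.Set.add, PySem.Set.contains, hm]
    rw [PySem.Set.update]
    simp only [List.foldl_cons]
    rw [hc]
    exact pv_update_eq t (fun x hx => h x (List.mem_cons_of_mem _ hx))

theorem pvA_eq (extracted_data : List (String × Int)) :
    categorize_extracted_data_py extracted_data
      = pvTarget (PySem.List.dedup (extracted_data.map (·.1))) := by
  unfold categorize_extracted_data_py pvTarget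
  simp only [pv_step_eq]
  set ks := PySem.List.dedup (extracted_data.map (·.1)) with hks
  set cs := ks.map pvClassify with hcs
  have hfold : ∀ (d0 : PySem.Dict String Int),
      ks.foldl (fun d k => d.modify (pvClassify k) 0 (· + 1)) d0
        = cs.foldl (fun d c => d.modify c 0 (· + 1)) d0 := by
    intro d0; rw [hcs, List.foldl_map]
  rw [hfold]
  set d0 : PySem.Dict String Int :=
    PySem.Dict.ofList [("Patient Information", 0), ("Medical Data", 0), ("Lab Results", 0),
                       ("Dates", 0), ("Administrative", 0), ("Other", 0)] with hd0
  have hkeysA : (cs.foldl (fun d c => d.modify c 0 (· + 1)) d0).keys = pvOrder := by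
    rw [PySem.Dict.keys_foldl_modify]
    have hsub : ∀ c ∈ cs, c ∈ pvOrder := by
      intro c hc
      rcases List.mem_map.mp (hcs ▸ hc) with ⟨k, _, rfl⟩
      exact pv_classify_mem k
    have hkeys0 : d0.keys = pvOrder := by rw [hd0]; decide
    rw [hkeys0]
    exact pv_update_eq cs hsub
  have hnodupA : (cs.foldl (fun d c => d.modify c 0 (· + 1)) d0).keys.Nodup := by
    rw [hkeysA]; decide
  have hitemsA : (cs.foldl (fun d c => d.modify c 0 (· + 1)) d0).items
      = pvOrder.map (fun c => (c, (cs.count c : Int))) := by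
    rw [PySem.Dict.items_eq_map_keys _ hnodupA 0, hkeysA]
    apply List.map_congr_left
    intro c hc
    rw [PySem.Dict.getD_foldl_modify_add_one]
    have h0 : d0.getD c 0 = 0 := by
      rw [hd0]; fin_cases hc <;> decide
    rw [h0, zero_add]
  rw [hitemsA]

theorem pv_cnt1 (ks : List String) (L : List String) (hL : L = ks.map PySem.Str.lower) :
    (ks.map pvClassify).count "Patient Information" = (List.filter (fun f => ["patient", "name", "id", "nummer"].any fun t => PySem.Str.isIn t f) L).length := by
  subst hL
  rw [List.count_eq_countP, List.countP_map, ← List.countP_eq_length_filter]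
  simp only [List.countP_map]
  refine List.countP_congr ?_
  intro k _
  simp only [Function.comp]
  unfold pvClassify pvM
  cases h1 : (["patient", "name", "id", "nummer"].any fun t => PySem.Str.isIn t (PySem.Str.lower k)) <;>
  cases h2 : (["diagnosis", "treatment", "medication", "pathology", "tumor", "cancer", "stage", "tnm"].any fun t => PySem.Str.isIn t (PySem.Str.lower k)) <;>
  cases h3 : (["lab", "test", "result", "value", "parameter", "hb", "leuko", "creatinine"].any fun t => PySem.Str.isIn t (PySem.Str.lower k)) <;>
  cases h4 : (["date", "datum", "time"].any fun t => PySem.Str.isIn t (PySem.Str.lower k)) <;>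
  cases h5 : (["hospital", "clinic", "department", "case", "fall", "report"].any fun t => PySem.Str.isIn t (PySem.Str.lower k)) <;>
  decide

theorem pv_cnt2 (ks : List String) (L : List String) (hL : L = ks.map PySem.Str.lower) :
    (ks.map pvClassify).count "Medical Data" = (List.filter (fun f => ["diagnosis", "treatment", "medication", "pathology", "tumor", "cancer", "stage", "tnm"].any fun t => PySem.Str.isIn t f) (List.filter (fun f => !(["patient", "name", "id", "nummer"].any fun t => PySem.Str.isIn t f)) L)).length := by
  subst hL
  rw [List.count_eq_countP, List.countP_map, ← List.countP_eq_length_filter]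
  simp only [List.countP_filter, List.countP_map]
  refine List.countP_congr ?_
  intro k _
  simp only [Function.comp]
  unfold pvClassify pvM
  cases h1 : (["patient", "name", "id", "nummer"].any fun t => PySem.Str.isIn t (PySem.Str.lower k)) <;>
  cases h2 : (["diagnosis", "treatment", "medication", "pathology", "tumor", "cancer", "stage", "tnm"].any fun t => PySem.Str.isIn t (PySem.Str.lower k)) <;>
  cases h3 : (["lab", "test", "result", "value", "parameter", "hb", "leuko", "creatinine"].any fun t => PySem.Str.isIn t (PySem.Str.lower k)) <;>
  cases h4 : (["date", "datum", "time"].any fun t => PySem.Str.isIn t (PySem.Str.lower k)) <;>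
  cases h5 : (["hospital", "clinic", "department", "case", "fall", "report"].any fun t => PySem.Str.isIn t (PySem.Str.lower k)) <;>
  decide

theorem pv_cnt3 (ks : List String) (L : List String) (hL : L = ks.map PySem.Str.lower) :
    (ks.map pvClassify).count "Lab Results" = (List.filter (fun f => ["lab", "test", "result", "value", "parameter", "hb", "leuko", "creatinine"].any fun t => PySem.Str.isIn t f) (List.filter (fun f => !(["diagnosis", "treatment", "medication", "pathology", "tumor", "cancer", "stage", "tnm"].any fun t => PySem.Str.isIn t f)) (List.filter (fun f => !(["patient", "name", "id", "nummer"].any fun t => PySem.Str.isIn t f)) L))).length := by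
  subst hL
  rw [List.count_eq_countP, List.countP_map, ← List.countP_eq_length_filter]
  simp only [List.countP_filter, List.countP_map]
  refine List.countP_congr ?_
  intro k _
  simp only [Function.comp]
  unfold pvClassify pvM
  cases h1 : (["patient", "name", "id", "nummer"].any fun t => PySem.Str.isIn t (PySem.Str.lower k)) <;>
  cases h2 : (["diagnosis", "treatment", "medication", "pathology", "tumor", "cancer", "stage", "tnm"].any fun t => PySem.Str.isIn t (PySem.Str.lower k)) <;>
  cases h3 : (["lab", "test", "result", "value", "parameter", "hb", "leuko", "creatinine"].any fun t => PySem.Str.isIn t (PySem.Str.lower k)) <;>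
  cases h4 : (["date", "datum", "time"].any fun t => PySem.Str.isIn t (PySem.Str.lower k)) <;>
  cases h5 : (["hospital", "clinic", "department", "case", "fall", "report"].any fun t => PySem.Str.isIn t (PySem.Str.lower k)) <;>
  decide

theorem pv_cnt4 (ks : List String) (L : List String) (hL : L = ks.map PySem.Str.lower) :
    (ks.map pvClassify).count "Dates" = (List.filter (fun f => ["date", "datum", "time"].any fun t => PySem.Str.isIn t f) (List.filter (fun f => !(["lab", "test", "result", "value", "parameter", "hb", "leuko", "creatinine"].any fun t => PySem.Str.isIn t f)) (List.filter (fun f => !(["diagnosis", "treatment", "medication", "pathology", "tumor", "cancer", "stage", "tnm"].any fun t => PySem.Str.isIn t f)) (List.filter (fun f => !(["patient", "name", "id", "nummer"].any fun t => PySem.Str.isIn t f)) L)))).length := by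
  subst hL
  rw [List.count_eq_countP, List.countP_map, ← List.countP_eq_length_filter]
  simp only [List.countP_filter, List.countP_map]
  refine List.countP_congr ?_
  intro k _
  simp only [Function.comp]
  unfold pvClassify pvM
  cases h1 : (["patient", "name", "id", "nummer"].any fun t => PySem.Str.isIn t (PySem.Str.lower k)) <;>
  cases h2 : (["diagnosis", "treatment", "medication", "pathology", "tumor", "cancer", "stage", "tnm"].any fun t => PySem.Str.isIn t (PySem.Str.lower k)) <;>
  cases h3 : (["lab", "test", "result", "value", "parameter", "hb", "leuko", "creatinine"].any fun t => PySem.Str.isIn t (PySem.Str.lower k)) <;>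
  cases h4 : (["date", "datum", "time"].any fun t => PySem.Str.isIn t (PySem.Str.lower k)) <;>
  cases h5 : (["hospital", "clinic", "department", "case", "fall", "report"].any fun t => PySem.Str.isIn t (PySem.Str.lower k)) <;>
  decide

theorem pv_cnt5 (ks : List String) (L : List String) (hL : L = ks.map PySem.Str.lower) :
    (ks.map pvClassify).count "Administrative" = (List.filter (fun f => ["hospital", "clinic", "department", "case", "fall", "report"].any fun t => PySem.Str.isIn t f) (List.filter (fun f => !(["date", "datum", "time"].any fun t => PySem.Str.isIn t f)) (List.filter (fun f => !(["lab", "test", "result", "value", "parameter", "hb", "leuko", "creatinine"].any fun t => PySem.Str.isIn t f)) (List.filter (fun f => !(["diagnosis", "treatment", "medication", "pathology", "tumor", "cancer", "stage", "tnm"].any fun t => PySem.Str.isIn t f)) (List.filter (fun f => !(["patient", "name", "id", "nummer"].any fun t => PySem.Str.isIn t f)) L))))).length := by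
  subst hL
  rw [List.count_eq_countP, List.countP_map, ← List.countP_eq_length_filter]
  simp only [List.countP_filter, List.countP_map]
  refine List.countP_congr ?_
  intro k _
  simp only [Function.comp]
  unfold pvClassify pvM
  cases h1 : (["patient", "name", "id", "nummer"].any fun t => PySem.Str.isIn t (PySem.Str.lower k)) <;>
  cases h2 : (["diagnosis", "treatment", "medication", "pathology", "tumor", "cancer", "stage", "tnm"].any fun t => PySem.Str.isIn t (PySem.Str.lower k)) <;>
  cases h3 : (["lab", "test", "result", "value", "parameter", "hb", "leuko", "creatinine"].any fun t => PySem.Str.isIn t (PySem.Str.lower k)) <;>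
  cases h4 : (["date", "datum", "time"].any fun t => PySem.Str.isIn t (PySem.Str.lower k)) <;>
  cases h5 : (["hospital", "clinic", "department", "case", "fall", "report"].any fun t => PySem.Str.isIn t (PySem.Str.lower k)) <;>
  decide

theorem pv_cnt6 (ks : List String) (L : List String) (hL : L = ks.map PySem.Str.lower) :
    (ks.map pvClassify).count "Other" = (List.filter (fun f => !(["hospital", "clinic", "department", "case", "fall", "report"].any fun t => PySem.Str.isIn t f)) (List.filter (fun f => !(["date", "datum", "time"].any fun t => PySem.Str.isIn t f)) (List.filter (fun f => !(["lab", "test", "result", "value", "parameter", "hb", "leuko", "creatinine"].any fun t => PySem.Str.isIn t f)) (List.filter (fun f => !(["diagnosis", "treatment", "medication", "pathology", "tumor", "cancer", "stage", "tnm"].any fun t => PySem.Str.isIn t f)) (List.filter (fun f => !(["patient", "name", "id", "nummer"].any fun t => PySem.Str.isIn t f)) L))))).length := by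
  subst hL
  rw [List.count_eq_countP, List.countP_map, ← List.countP_eq_length_filter]
  simp only [List.countP_filter, List.countP_map]
  refine List.countP_congr ?_
  intro k _
  simp only [Function.comp]
  unfold pvClassify pvM
  cases h1 : (["patient", "name", "id", "nummer"].any fun t => PySem.Str.isIn t (PySem.Str.lower k)) <;>
  cases h2 : (["diagnosis", "treatment", "medication", "pathology", "tumor", "cancer", "stage", "tnm"].any fun t => PySem.Str.isIn t (PySem.Str.lower k)) <;>
  cases h3 : (["lab", "test", "result", "value", "parameter", "hb", "leuko", "creatinine"].any fun t => PySem.Str.isIn t (PySem.Str.lower k)) <;>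
  cases h4 : (["date", "datum", "time"].any fun t => PySem.Str.isIn t (PySem.Str.lower k)) <;>
  cases h5 : (["hospital", "clinic", "department", "case", "fall", "report"].any fun t => PySem.Str.isIn t (PySem.Str.lower k)) <;>
  decide

theorem pv_if_flip {α : Type} (F : List String) (X Y : α) :
    (if F.isEmpty then X else Y) = if ((F.length : Int) > 0) then Y else X := by
  cases F <;> simp

theorem pv_items_ofList (pairs : List (String × Int)) (h : (pairs.map Prod.fst).Nodup) :
    (PySem.Dict.ofList pairs).items = pairs := by
  have := PySem.Dict.items_foldl_insert_fresh (l := pairs) (k := Prod.fst) (v := Prod.snd)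
      (d := PySem.Dict.empty) (by intro a _; exact PySem.Dict.contains_empty _) h
  simpa using this

theorem pv_wrap (pairs target : List (String × Int)) (h : pairs = target)
    (hnd : (target.map Prod.fst).Nodup) : (PySem.Dict.ofList pairs).items = target := by
  subst h; exact pv_items_ofList _ hnd

theorem pv_nodup_target (ks : List String) : ((pvTarget ks).map Prod.fst).Nodup := by
  unfold pvTarget
  refine List.Sublist.nodup (List.Sublist.map Prod.fst List.filter_sublist) ?_
  rw [List.map_map]
  have h : (Prod.fst ∘ fun c => (c, ((ks.map pvClassify).count c : Int))) = fun c => c := rfl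
  rw [h, List.map_id']
  decide

theorem pvB_eq (extracted_data : List (String × Int)) :
    categorize_extracted_data_py_alt extracted_data
      = pvTarget (PySem.List.dedup (extracted_data.map (·.1))) := by
  unfold categorize_extracted_data_py_alt
  set L := (PySem.List.dedup (extracted_data.map (·.1))).map PySem.Str.lower with hL
  refine pv_wrap _ _ ?_ (pv_nodup_target _)
  simp only [pvTable, List.foldl_cons, List.foldl_nil, pvStepB]
  unfold pvTarget pvOrder pvTable
  simp only [List.map_cons, List.map_nil, List.map_append, List.nil_append]
  rw [pv_cnt1 _ L hL, pv_cnt2 _ L hL, pv_cnt3 _ L hL, pv_cnt4 _ L hL, pv_cnt5 _ L hL, pv_cnt6 _ L hL]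
  generalize (List.filter (fun f => ["patient", "name", "id", "nummer"].any fun t => PySem.Str.isIn t f) L) = F1
  generalize (List.filter (fun f => !(["patient", "name", "id", "nummer"].any fun t => PySem.Str.isIn t f)) L) = R1
  generalize (List.filter (fun f => ["diagnosis", "treatment", "medication", "pathology", "tumor", "cancer", "stage", "tnm"].any fun t => PySem.Str.isIn t f) R1) = F2
  generalize (List.filter (fun f => !(["diagnosis", "treatment", "medication", "pathology", "tumor", "cancer", "stage", "tnm"].any fun t => PySem.Str.isIn t f)) R1) = R2
  generalize (List.filter (fun f => ["lab", "test", "result", "value", "parameter", "hb", "leuko", "creatinine"].any fun t => PySem.Str.isIn t f) R2) = F3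
  generalize (List.filter (fun f => !(["lab", "test", "result", "value", "parameter", "hb", "leuko", "creatinine"].any fun t => PySem.Str.isIn t f)) R2) = R3
  generalize (List.filter (fun f => ["date", "datum", "time"].any fun t => PySem.Str.isIn t f) R3) = F4
  generalize (List.filter (fun f => !(["date", "datum", "time"].any fun t => PySem.Str.isIn t f)) R3) = R4
  generalize (List.filter (fun f => ["hospital", "clinic", "department", "case", "fall", "report"].any fun t => PySem.Str.isIn t f) R4) = F5
  generalize (List.filter (fun f => !(["hospital", "clinic", "department", "case", "fall", "report"].any fun t => PySem.Str.isIn t f)) R4) = R5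
  simp only [pv_if_flip]
  split_ifs <;> simp_all


-- ===== VERDICT (by name: the statement is the Claim_ definition above) =====
theorem categorize_extracted_data_py_spec : Claim_equal_categorize_extracted_data_py := by
  intro extracted_data _
  unfold Spec_categorize_extracted_data_py
  rw [pvA_eq, pvB_eq]
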